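-- pv_equiv track=rewrite | github.com/Sharad2001/Data-structures-and-algorithms | minimum_X_(xor)_A.py | minVal
-- ===== SOURCE A (Python) =====
-- def minVal(a, b):
--     one = bin(b).count("1")
--     ans = 0
--     bit = 1 << 29
--     while one > 0 and bit > 0:
--         if a & bit:
--             ans |= bit
--             one -= 1
--         bit >>= 1
--
--     bit = 1
--     while one > 0 and bit <= 1 << 29:
--         if ans & bit == 0:
--             ans |= bit
--             one -= 1
--         bit <<= 1
--     return ans
-- ===== SOURCE B (Python) =====
-- def minVal(a, b):
--     one = bin(b).count("1")
--     ans = a & ((1 << 30) - 1)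
--     k = bin(ans).count("1") - one
--     if k >= 0:
--         for _ in range(k):
--             ans &= ans - 1          # Kernighan: strip the lowest set bit
--     else:
--         for _ in range(-k):
--             low = ~ans & (ans + 1)  # lowest clear bit
--             if low >> 30:
--                 break               # all 30 positions already set
--             ans |= low
--     return ans
-- ===== Notes on version B (the rewrite author's own statement) =====
-- stated objective: alternative
-- what changed: Replaces A's two 30-step per-position mask scans by popcount arithmetic on a & ((1<<30)-1): Kernighan's ans &= ans-1 strips the surplus lowest set bits, or ~ans & (ans+1) repeatedly ORs in the lowest clear bit, iterating only |popcount(a&mask) - popcount(b)| times.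
import Mathlib
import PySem

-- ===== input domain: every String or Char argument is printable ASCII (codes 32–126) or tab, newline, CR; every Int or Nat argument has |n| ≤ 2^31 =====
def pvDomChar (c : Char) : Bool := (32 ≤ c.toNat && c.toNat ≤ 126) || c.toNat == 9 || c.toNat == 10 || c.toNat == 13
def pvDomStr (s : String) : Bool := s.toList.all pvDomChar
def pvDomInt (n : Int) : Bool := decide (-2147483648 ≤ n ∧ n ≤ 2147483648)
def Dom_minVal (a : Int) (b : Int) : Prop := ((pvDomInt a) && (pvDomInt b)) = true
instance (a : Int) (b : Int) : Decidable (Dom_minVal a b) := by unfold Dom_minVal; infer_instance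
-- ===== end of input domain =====

-- B replaces A's two per-position scans over a shifting mask by popcount-driven bit tricks:
-- Kernighan's ans &= ans-1 to strip surplus low set bits, or ~ans & (ans+1) to fill lowest clear
-- bits — a different algorithm of similar cost (no speed claim).

-- ===== PORT A =====
-- first while loop: bit halves from 1<<29; fuel 31 exceeds the ≤ 30 iterations the guard allows.
def minValLoop1 (a : Int) : Nat → Int → Int → Int → Int × Int
  | fuel, one, ans, bit =>
    if one > 0 ∧ bit > 0 then
      match fuel with
      | 0 => (one, ans)
      | fuel + 1 =>
        if PySem.Int.band a bit ≠ 0 then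
          minValLoop1 a fuel (one - 1) (PySem.Int.bor ans bit) (bit >>> 1)
        else
          minValLoop1 a fuel one ans (bit >>> 1)
    else (one, ans)

-- second while loop: bit doubles from 1 while ≤ 1<<29; fuel 31 exceeds the ≤ 30 iterations.
def minValLoop2 : Nat → Int → Int → Int → Int
  | fuel, one, ans, bit =>
    if one > 0 ∧ bit ≤ (1 : Int) <<< 29 then
      match fuel with
      | 0 => ans
      | fuel + 1 =>
        if PySem.Int.band ans bit = 0 then
          minValLoop2 fuel (one - 1) (PySem.Int.bor ans bit) (bit <<< 1)
        else
          minValLoop2 fuel one ans (bit <<< 1)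
    else ans

-- 'bin(b).count("1")' = popcount of |b| = PySem.Int.bitCount b (exact, also for negative b).
def minVal (a : Int) (b : Int) : Int :=
  let one : Int := (PySem.Int.bitCount b : Int)
  let r := minValLoop1 a 31 one 0 ((1 : Int) <<< 29)
  minValLoop2 31 r.1 r.2 1

-- ===== PORT B =====
-- 'for _ in range(k): ans &= ans - 1' (Kernighan's lowest-set-bit strip)
def stripLoop : Nat → Int → Int
  | 0, ans => ans
  | j + 1, ans => stripLoop j (PySem.Int.band ans (ans - 1))

-- 'for _ in range(-k): low = ~ans & (ans+1); if low >> 30: break; ans |= low'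
def fillLoop : Nat → Int → Int
  | 0, ans => ans
  | j + 1, ans =>
    let low := PySem.Int.band (Int.not ans) (ans + 1)
    if low >>> (30 : Nat) ≠ 0 then ans else fillLoop j (PySem.Int.bor ans low)

def minVal_alt (a : Int) (b : Int) : Int :=
  let one : Int := (PySem.Int.bitCount b : Int)
  let ans : Int := PySem.Int.band a (((1 : Int) <<< 30) - 1)
  let k : Int := (PySem.Int.bitCount ans : Int) - one
  if 0 ≤ k then stripLoop k.toNat ans else fillLoop (-k).toNat ans

-- ===== PRECONDITION & SPEC =====
def Spec_minVal (a : Int) (b : Int) (out : Int) : Prop := out = minVal_alt a b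
instance (a : Int) (b : Int) (out : Int) : Decidable (Spec_minVal a b out) := by unfold Spec_minVal; infer_instance

-- ===== CLAIM (what is proved, stated in full; the proofs are below) =====
def Claim_equal_minVal : Prop := ∀ (a : Int) (b : Int), Dom_minVal a b → Spec_minVal a b (minVal a b)

-- ===== LEMMAS AND PROOFS =====

-- proof-only: Nat-position views of both programs
def bitP (a : Int) (k : Nat) : Bool := PySem.Int.band a ((2 ^ k : Nat) : Int) != 0

def orN (n : Nat) (k : Nat) : Nat := n ||| 2 ^ k

def orB (ans : Int) (k : Nat) : Int := PySem.Int.bor ans ((2 ^ k : Nat) : Int)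

def descList : Nat → List Nat
  | 0 => [0]
  | k + 1 => (k + 1) :: descList k

def ascFrom : Nat → Nat → List Nat
  | _, 0 => []
  | s, l + 1 => s :: ascFrom (s + 1) l

def specDown (a : Int) : Int → Int → List Nat → Int × Int
  | one, ans, [] => (one, ans)
  | one, ans, k :: t =>
    if one > 0 then
      if bitP a k then specDown a (one - 1) (orB ans k) t else specDown a one ans t
    else (one, ans)

def specUp : Int → Int → List Nat → Int
  | _, ans, [] => ans
  | one, ans, k :: t =>
    if one > 0 then
      if PySem.Int.band ans ((2 ^ k : Nat) : Int) = 0 then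
        specUp (one - 1) (orB ans k) t
      else specUp one ans t
    else ans

theorem specDown_cons (a one ans : Int) (k : Nat) (t : List Nat) :
    specDown a one ans (k :: t) =
      if one > 0 then (if bitP a k then specDown a (one - 1) (orB ans k) t else specDown a one ans t)
      else (one, ans) := rfl

theorem specUp_cons (one ans : Int) (k : Nat) (t : List Nat) :
    specUp one ans (k :: t) =
      if one > 0 then
        (if PySem.Int.band ans ((2 ^ k : Nat) : Int) = 0 then specUp (one - 1) (orB ans k) t
         else specUp one ans t)
      else ans := rfl

theorem loop1_eq (a : Int) (K : Nat) : ∀ (one ans : Int) (fuel : Nat), K + 1 ≤ fuel →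
    minValLoop1 a fuel one ans ((2 ^ K : Nat) : Int) = specDown a one ans (descList K) := by
  induction K with
  | zero =>
    intro one ans fuel hf
    obtain ⟨f, rfl⟩ : ∃ f, fuel = f + 1 := ⟨fuel - 1, by omega⟩
    rw [minValLoop1]
    rw [show descList 0 = [0] from rfl, specDown_cons]
    by_cases h1 : one > 0
    · rw [if_pos (⟨h1, by norm_num⟩ : one > 0 ∧ ((2^0 : Nat) : Int) > 0), if_pos h1]
      have hsh : (((2^0 : Nat) : Int) >>> (1:Int)) = ((0:Nat) : Int) := rfl
      by_cases h2 : PySem.Int.band a ((2^0 : Nat) : Int) ≠ 0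
      · rw [if_pos h2, if_pos (by simpa [bitP, bne_iff_ne] using h2), hsh, minValLoop1.eq_def]
        simp [specDown, orB]
      · rw [if_neg h2, if_neg (by simpa [bitP, bne_iff_ne] using h2), hsh, minValLoop1.eq_def]
        simp [specDown]
    · rw [if_neg (by simp [h1]), if_neg h1]
  | succ K ih =>
    intro one ans fuel hf
    obtain ⟨f, rfl⟩ : ∃ f, fuel = f + 1 := ⟨fuel - 1, by omega⟩
    rw [minValLoop1]
    rw [show descList (K+1) = (K+1) :: descList K from rfl, specDown_cons]
    by_cases h1 : one > 0
    · rw [if_pos (⟨h1, by positivity⟩ : one > 0 ∧ ((2^(K+1) : Nat) : Int) > 0), if_pos h1]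
      have hsh : (((2^(K+1) : Nat) : Int) >>> (1:Int)) = ((2^K : Nat) : Int) := by
        show ((2^(K+1) >>> 1 : Nat) : Int) = _
        norm_num [Nat.shiftRight_succ, Nat.pow_succ]
      by_cases h2 : PySem.Int.band a ((2^(K+1) : Nat) : Int) ≠ 0
      · rw [if_pos h2, if_pos (by simpa [bitP, bne_iff_ne] using h2), hsh, orB]
        exact ih _ _ f (by omega)
      · rw [if_neg h2, if_neg (by simpa [bitP, bne_iff_ne] using h2), hsh]
        exact ih _ _ f (by omega)
    · rw [if_neg (by simp [h1]), if_neg h1]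

theorem loop2_eq : ∀ (m : Nat), m ≤ 30 → ∀ (one ans : Int) (fuel : Nat), m ≤ fuel →
    minValLoop2 fuel one ans ((2 ^ (30 - m) : Nat) : Int) = specUp one ans (ascFrom (30 - m) m) := by
  intro m
  induction m with
  | zero =>
    intro _ one ans fuel _
    cases fuel <;>
      (rw [minValLoop2]; rw [if_neg (by rintro ⟨-, h⟩; revert h; decide)]; rfl)
  | succ m ih =>
    intro hm one ans fuel hf
    obtain ⟨f, rfl⟩ : ∃ f, fuel = f + 1 := ⟨fuel - 1, by omega⟩
    have he : 30 - (m + 1) + 1 = 30 - m := by omega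
    rw [minValLoop2]
    rw [show ascFrom (30 - (m+1)) (m+1) = (30 - (m+1)) :: ascFrom (30 - (m+1) + 1) m from rfl,
        specUp_cons]
    by_cases h1 : one > 0
    · have hle : ((2 ^ (30 - (m+1)) : Nat) : Int) ≤ (1 : Int) <<< 29 := by
        rw [show ((1:Int) <<< 29) = ((2^29 : Nat) : Int) by decide]
        exact_mod_cast Nat.pow_le_pow_right (by norm_num) (by omega)
      rw [if_pos ⟨h1, hle⟩, if_pos h1]
      have hsh : (((2 ^ (30 - (m+1)) : Nat) : Int) <<< (1:Int)) = ((2 ^ (30 - m) : Nat) : Int) := by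
        show ((2 ^ (30 - (m+1)) <<< 1 : Nat) : Int) = _
        rw [Nat.shiftLeft_eq, pow_one, ← he, pow_succ]
      by_cases h2 : PySem.Int.band ans ((2 ^ (30 - (m+1)) : Nat) : Int) = 0
      · rw [if_pos h2, if_pos h2, hsh, orB, he]
        exact ih (by omega) _ _ f (by omega)
      · rw [if_neg h2, if_neg h2, hsh, he]
        exact ih (by omega) _ _ f (by omega)
    · rw [if_neg (by simp [h1]), if_neg h1]

theorem orB_cast (n k : Nat) : orB (↑n) k = ↑(orN n k) := by
  unfold orB orN
  rw [PySem.Int.bor_natCast]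

theorem band_cast_eq_zero (n k : Nat) :
    (PySem.Int.band (↑n) ((2 ^ k : Nat) : Int) = 0) ↔ n.testBit k = false := by
  rw [PySem.Int.band_natCast]
  constructor
  · intro h
    have : n &&& 2 ^ k = 0 := by exact_mod_cast h
    rw [Nat.and_two_pow] at this
    rcases Bool.eq_false_or_eq_true (n.testBit k) with hb | hb
    · rw [hb] at this; simp at this
    · exact hb
  · intro h
    have : n &&& 2 ^ k = 0 := by rw [Nat.and_two_pow, h]; simp
    exact_mod_cast this

theorem specDown_eq (a : Int) (l : List Nat) : ∀ (one : Int) (n : Nat),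
    specDown a one (↑n) l =
      (one - ↑(min one.toNat ((l.filter (bitP a)).length)),
       ↑(List.foldl orN n ((l.filter (bitP a)).take one.toNat))) := by
  induction l with
  | nil => intro one n; simp [specDown]
  | cons k t ih =>
    intro one n
    rw [specDown_cons]
    by_cases h1 : one > 0
    · rw [if_pos h1]
      have hto : one.toNat = (one - 1).toNat + 1 := by omega
      by_cases h2 : bitP a k
      · rw [if_pos h2, orB_cast, ih]
        simp only [List.filter_cons, h2, if_pos, List.length_cons, hto, List.take_succ_cons,
          List.foldl_cons]
        simp only [Prod.mk.injEq]
        refine ⟨by push_cast; omega, trivial⟩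
      · rw [if_neg h2, ih]
        simp only [List.filter_cons, h2]
        simp
    · rw [if_neg h1]
      have hto : one.toNat = 0 := by omega
      simp [hto]

theorem specUp_eq (l : List Nat) : ∀ (one : Int) (n : Nat), l.Pairwise (· ≠ ·) →
    specUp one (↑n) l =
      ↑(List.foldl orN n ((l.filter (fun k => !n.testBit k)).take one.toNat)) := by
  induction l with
  | nil => intro one n _; simp [specUp]
  | cons k t ih =>
    intro one n hp
    rcases List.pairwise_cons.mp hp with ⟨hk, hpt⟩
    rw [specUp_cons]
    by_cases h1 : one > 0
    · rw [if_pos h1]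
      have hto : one.toNat = (one - 1).toNat + 1 := by omega
      by_cases h2 : PySem.Int.band (↑n) ((2 ^ k : Nat) : Int) = 0
      · have hb : n.testBit k = false := (band_cast_eq_zero n k).mp h2
        rw [if_pos h2, orB_cast, ih _ _ hpt]
        have hfilt : t.filter (fun j => !(orN n k).testBit j) = t.filter (fun j => !n.testBit j) := by
          apply List.filter_congr
          intro j hj
          have : (orN n k).testBit j = n.testBit j := by
            simp [orN, (hk j hj)]
          rw [this]
        rw [hfilt]
        simp only [List.filter_cons, hb, Bool.not_false, if_pos, hto, List.take_succ_cons,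
          List.foldl_cons]
      · have hb : n.testBit k = true := by
          rcases Bool.eq_false_or_eq_true (n.testBit k) with h | h
          · exact h
          · exact absurd ((band_cast_eq_zero n k).mpr h) h2
        rw [if_neg h2, ih _ _ hpt]
        simp [hb]
    · rw [if_neg h1]
      have hto : one.toNat = 0 := by omega
      simp [hto]

theorem testBit_foldl_orN (l : List Nat) : ∀ (n j : Nat),
    (List.foldl orN n l).testBit j = (n.testBit j || decide (j ∈ l)) := by
  induction l with
  | nil => intro n j; simp
  | cons k t ih =>
    intro n j
    rw [List.foldl_cons, ih]
    simp [orN, Nat.testBit_two_pow, List.mem_cons, eq_comm, Bool.or_assoc]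

-- the canonical value both programs compute, as a Nat at masked value m
def Dm (m : Nat) : List Nat := (descList 29).filter m.testBit
def Fm (m : Nat) : List Nat := (ascFrom 0 30).filter (fun k => !m.testBit k)

-- Python's a & ((1<<30)-1) as a Nat
def Mof (a : Int) : Nat := (PySem.Int.band a (((2 ^ 30 - 1 : Nat)) : Int)).toNat

theorem mem_descList29 (k : Nat) : k ∈ descList 29 ↔ k ≤ 29 := by
  rw [show descList 29 = [29,28,27,26,25,24,23,22,21,20,19,18,17,16,15,14,13,12,11,10,9,8,7,6,5,4,3,2,1,0] from rfl]
  simp; omega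

theorem mem_ascFrom30 (k : Nat) : k ∈ ascFrom 0 30 ↔ k ≤ 29 := by
  rw [show ascFrom 0 30 = [0,1,2,3,4,5,6,7,8,9,10,11,12,13,14,15,16,17,18,19,20,21,22,23,24,25,26,27,28,29] from rfl]
  simp; omega

-- ((2^w - 1) - r) is the bitwise complement of r below w
theorem subBit : ∀ (w r k : Nat), r < 2 ^ w →
    ((2 ^ w - 1) - r).testBit k = (decide (k < w) && !(r.testBit k)) := by
  intro w
  induction w with
  | zero =>
    intro r k hr
    interval_cases r
    simp
  | succ w ih =>
    intro r k hr
    have h2 : 0 < 2 ^ w := Nat.two_pow_pos w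
    have hpow : 2 ^ (w+1) = 2 * 2 ^ w := by rw [pow_succ]; ring
    have hq : r / 2 < 2 ^ w := by omega
    have hd : (2 ^ (w+1) - 1) - r = 2 * ((2 ^ w - 1) - r / 2) + (1 - r % 2) := by omega
    cases k with
    | zero =>
      rw [Nat.testBit_zero, Nat.testBit_zero, hd]
      rcases Nat.mod_two_eq_zero_or_one r with h | h <;> simp [h]
    | succ k =>
      rw [Nat.testBit_succ, Nat.testBit_succ, hd]
      have : (2 * ((2 ^ w - 1) - r / 2) + (1 - r % 2)) / 2 = (2 ^ w - 1) - r / 2 := by omega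
      rw [this, ih _ k hq]
      simp only [Nat.succ_lt_succ_iff]

-- band with a literal single bit / mask, for arbitrary (possibly negative) a
theorem band_negSucc_natCast (n m : Nat) :
    PySem.Int.band (Int.negSucc n) (m : Int) = ((m - (m &&& n) : Nat) : Int) := by
  unfold PySem.Int.band
  rw [if_neg (by omega), if_pos (by omega)]
  norm_num

theorem bitP_eq_testBit_Mof (a : Int) (k : Nat) (hk : k ≤ 29) :
    bitP a k = (Mof a).testBit k := by
  rcases a with n | n
  · show (PySem.Int.band (↑n) _ != 0) = ((PySem.Int.band (↑n) _).toNat).testBit k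
    rw [PySem.Int.band_natCast, PySem.Int.band_natCast, Nat.and_two_pow_sub_one_eq_mod,
        Nat.and_two_pow]
    simp only [Int.toNat_natCast, Nat.testBit_mod_two_pow, show decide (k < 30) = true by simp; omega,
      Bool.true_and]
    rcases Bool.eq_false_or_eq_true (n.testBit k) with hb | hb <;>
      simp [hb]
  · rw [bitP, Mof, band_negSucc_natCast, band_negSucc_natCast]
    have hand : 2 ^ k &&& n = (n.testBit k).toNat * 2 ^ k := by
      rw [Nat.and_comm, Nat.and_two_pow]
    have hmod : 2 ^ 30 - 1 &&& n = n % 2 ^ 30 := by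
      rw [Nat.and_comm, Nat.and_two_pow_sub_one_eq_mod]
    rw [hand, hmod]
    simp only [Int.toNat_natCast]
    rw [subBit 30 (n % 2 ^ 30) k (Nat.mod_lt _ (by norm_num)),
        Nat.testBit_mod_two_pow]
    have h2 : 0 < 2 ^ k := Nat.two_pow_pos k
    rcases Bool.eq_false_or_eq_true (n.testBit k) with hb | hb <;>
      simp [hb, show k < 30 by omega]

theorem Mof_lt (a : Int) : Mof a < 2 ^ 30 := by
  rcases a with n | n
  · show (PySem.Int.band (↑n) _).toNat < _
    rw [PySem.Int.band_natCast, Nat.and_two_pow_sub_one_eq_mod]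
    simp
    omega
  · rw [Mof, band_negSucc_natCast]
    simp
    omega

-- popcount of a Nat below 2^w counts its set bits below w
theorem bitCount_eq_countP : ∀ (w m : Nat), m < 2 ^ w →
    PySem.Int.bitCount (m : Int) = (List.range w).countP m.testBit := by
  intro w
  induction w with
  | zero =>
    intro m hm
    interval_cases m
    simp [PySem.Int.bitCount_zero]
  | succ w ih =>
    intro m hm
    rcases Nat.eq_zero_or_pos m with rfl | hp
    · rw [List.countP_eq_length_filter,
          List.filter_eq_nil_iff.mpr (by intro x _; simp [Nat.zero_testBit])]
      simp [PySem.Int.bitCount_zero]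
    · rw [PySem.Int.bitCount_natCast hp, ih (m / 2) (by rw [pow_succ] at hm; omega)]
      rw [List.range_succ_eq_map, List.countP_cons, List.countP_map]
      have hc : List.countP (m.testBit ∘ Nat.succ) (List.range w)
          = List.countP (m / 2).testBit (List.range w) := by
        apply List.countP_congr
        intro x _
        simp [Function.comp, Nat.testBit_succ]
      rw [hc]
      rcases Nat.mod_two_eq_zero_or_one m with h | h <;>
        simp [Nat.testBit_zero, h] <;> omega

theorem length_Dm (m : Nat) : (Dm m).length = (List.range 30).countP m.testBit := by
  rw [Dm, List.countP_eq_length_filter.symm,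
      show descList 29 = (List.range 30).reverse by decide, List.countP_reverse]

theorem foldl_orN_Dm (m : Nat) (hm : m < 2 ^ 30) : List.foldl orN 0 (Dm m) = m := by
  apply Nat.eq_of_testBit_eq
  intro i
  rw [testBit_foldl_orN]
  simp only [Nat.zero_testBit, Bool.false_or]
  by_cases hi : i ≤ 29
  · rcases Bool.eq_false_or_eq_true (m.testBit i) with hb | hb <;>
      simp [Dm, List.mem_filter, mem_descList29, hi, hb]
  · have h1 : m.testBit i = false :=
      Nat.testBit_lt_two_pow (lt_of_lt_of_le hm (Nat.pow_le_pow_right (by norm_num) (by omega)))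
    simp [Dm, List.mem_filter, mem_descList29, h1]

-- the single bit-trick step: with the low part known, & of the two neighbours drops it
theorem and_succ_pred (u p : Nat) :
    (2 ^ (p+1) * u + 2 ^ p) &&& (2 ^ (p+1) * u + (2 ^ p - 1)) = 2 ^ (p+1) * u := by
  have hp1 : (2:Nat) ^ p < 2 ^ (p+1) := by
    have := Nat.two_pow_pos p; omega
  apply Nat.eq_of_testBit_eq
  intro i
  rw [Nat.testBit_and, Nat.testBit_two_pow_mul_add u (by omega) i,
      Nat.testBit_two_pow_mul_add u (by omega) i, Nat.testBit_two_pow_mul]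
  by_cases h : i < p + 1
  · rw [if_pos h, if_pos h]
    rcases Nat.lt_or_ge i p with h' | h'
    · simp [Nat.testBit_two_pow_sub_one, h', show p ≠ i by omega, show ¬p < i by omega]
    · have : i = p := by omega
      subst this
      simp [Nat.testBit_two_pow_self, Nat.testBit_two_pow_sub_one]
  · rw [if_neg h, if_neg h]
    simp [show i ≥ p + 1 by omega, Bool.and_self]

-- Kernighan strip over a strictly descending position list removes the last (lowest) position
theorem strip_once (K : List Nat) (p : Nat) (hp : ∀ x ∈ K, p < x) :
    (List.foldl orN 0 (K ++ [p])) &&& (List.foldl orN 0 (K ++ [p]) - 1) = List.foldl orN 0 K := by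
  set v := List.foldl orN 0 K with hv
  have hmod : v % 2 ^ (p + 1) = 0 := by
    apply Nat.eq_of_testBit_eq
    intro i
    rw [Nat.testBit_mod_two_pow, Nat.zero_testBit]
    by_cases hip : i < p + 1
    · rw [hv, testBit_foldl_orN]
      have : i ∉ K := fun h => absurd (hp i h) (by omega)
      simp [Nat.zero_testBit, this]
    · simp [hip]
  obtain ⟨u, hu⟩ : ∃ u, v = 2 ^ (p + 1) * u := ⟨v / 2 ^ (p + 1), by have := Nat.div_add_mod v (2 ^ (p + 1)); omega⟩
  have happ : List.foldl orN 0 (K ++ [p]) = orN v p := by rw [List.foldl_append]; rfl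
  have hor : orN v p = 2 ^ (p + 1) * u + 2 ^ p := by
    rw [orN, hu, ← Nat.two_pow_add_eq_or_of_lt (by have := Nat.two_pow_pos p; omega)]
  have hp0 : 0 < 2 ^ p := Nat.two_pow_pos p
  rw [happ, hor, show 2 ^ (p+1) * u + 2 ^ p - 1 = 2 ^ (p+1) * u + (2 ^ p - 1) by omega,
      and_succ_pred, hu]

theorem strip_eq : ∀ (kk : Nat) (L : List Nat), L.Pairwise (· > ·) → kk ≤ L.length →
    stripLoop kk ↑(List.foldl orN 0 L) = ↑(List.foldl orN 0 (L.take (L.length - kk))) := by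
  intro kk
  induction kk with
  | zero => intro L _ _; rw [Nat.sub_zero, List.take_length]; rfl
  | succ kk ih =>
    intro L hpw hlen
    have hne : L ≠ [] := by intro h; subst h; simp at hlen
    set K := L.dropLast with hK
    set p := L.getLast hne with hp
    have hKP : K ++ [p] = L := List.dropLast_append_getLast hne
    have hKlen : L.length = K.length + 1 := by
      rw [← hKP]; simp
    have hgt : ∀ x ∈ K, p < x := by
      intro x hx
      have := (List.pairwise_append.mp (hKP ▸ hpw)).2.2
      exact this x hx p (by simp)
    have hKpw : K.Pairwise (· > ·) := (List.pairwise_append.mp (hKP ▸ hpw)).1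
    have hvpos : 0 < List.foldl orN 0 L := by
      rw [← hKP, List.foldl_append]
      show 0 < orN _ p
      rw [orN]
      have := Nat.two_pow_pos p
      have := Nat.right_le_or (n := List.foldl orN 0 K) (m := 2 ^ p)
      omega
    rw [stripLoop]
    have hcast : (↑(List.foldl orN 0 L) : Int) - 1 = ((List.foldl orN 0 L - 1 : Nat) : Int) := by
      omega
    rw [hcast, PySem.Int.band_natCast]
    rw [show (List.foldl orN 0 L) &&& (List.foldl orN 0 L - 1) = List.foldl orN 0 K by
          rw [← hKP]; exact strip_once K p hgt]
    rw [ih K hKpw (by omega)]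
    have hlen2 : L.length - (kk + 1) = K.length - kk := by omega
    conv_rhs => rw [hlen2, ← hKP, List.take_append_of_le_length (by omega)]

-- the fill loop walks the ascending clear positions of m
theorem band_not_succ (n : Nat) :
    PySem.Int.band (Int.not (n : Int)) ((n : Int) + 1) = ((n + 1 - ((n + 1) &&& n) : Nat) : Int) := by
  have hnot : Int.not (n : Int) = -(n : Int) - 1 := by simp [Int.not]; omega
  unfold PySem.Int.band
  rw [hnot, if_neg (by omega), if_pos (by omega)]
  norm_num

theorem natCast_shiftRight30 (m : Nat) : ((m : Int) >>> (30 : Nat)) = ((m >>> 30 : Nat) : Int) := by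
  simp [Int.shiftRight_eq, Int.natCast_shiftRight]

theorem pairwise_lt_Fm (m : Nat) : (Fm m).Pairwise (· < ·) :=
  List.Pairwise.filter _ (by decide : (ascFrom 0 30).Pairwise (· < ·))

theorem pairwise_gt_Dm (m : Nat) : (Dm m).Pairwise (· > ·) :=
  List.Pairwise.filter _ (by decide : (descList 29).Pairwise (· > ·))

theorem fill_eq (m : Nat) (hm : m < 2 ^ 30) : ∀ (j i : Nat), i ≤ (Fm m).length →
    fillLoop j ↑(List.foldl orN m ((Fm m).take i)) =
      ↑(List.foldl orN m ((Fm m).take (min (i + j) (Fm m).length))) := by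
  intro j
  induction j with
  | zero =>
    intro i hi
    rw [show min (i + 0) (Fm m).length = i by omega]
    rfl
  | succ j ih =>
    intro i hi
    set F := Fm m with hF
    set n := List.foldl orN m (F.take i) with hn
    have htb : ∀ q, n.testBit q = (m.testBit q || decide (q ∈ F.take i)) := by
      intro q; rw [hn, testBit_foldl_orN]
    have hFpw : F.Pairwise (· < ·) := by rw [hF]; exact pairwise_lt_Fm m
    have hFget := List.pairwise_iff_getElem.mp hFpw
    have hmemF : ∀ q, q ∈ F ↔ (q ≤ 29 ∧ m.testBit q = false) := by
      intro q
      rw [hF, Fm, List.mem_filter, mem_ascFrom30]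
      simp
    rcases Nat.lt_or_ge i F.length with hilt | hige
    · -- one more clear position to fill
      set c := F[i] with hc
      have hcF : c ∈ F := List.getElem_mem hilt
      have hc29 : c ≤ 29 := ((hmemF c).mp hcF).1
      have hmc : m.testBit c = false := ((hmemF c).mp hcF).2
      have hlow : ∀ q, q < c → n.testBit q = true := by
        intro q hq
        rw [htb]
        rcases Bool.eq_false_or_eq_true (m.testBit q) with hb | hb
        · simp [hb]
        · have hqF : q ∈ F := (hmemF q).mpr ⟨by omega, hb⟩
          obtain ⟨jd, hjd, hje⟩ := List.mem_iff_getElem.mp hqF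
          have hjdi : jd < i := by
            by_contra hcon
            rcases Nat.lt_or_ge i jd with h' | h'
            · have := hFget i jd hilt hjd h'
              omega
            · have : jd = i := by omega
              subst this
              rw [hje] at hc
              omega
          have hmt : q ∈ F.take i := List.mem_take_iff_getElem.mpr ⟨jd, by omega, hje⟩
          simp [hb, hmt]
      have hbc : n.testBit c = false := by
        rw [htb, hmc]
        simp only [Bool.false_or, decide_eq_false_iff_not]
        intro hmem
        obtain ⟨jd, hjd, hje⟩ := List.mem_take_iff_getElem.mp hmem
        have := hFget jd i (by omega) hilt (by omega)
        omega
      have hmod : n % 2 ^ (c + 1) = 2 ^ c - 1 := by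
        apply Nat.eq_of_testBit_eq
        intro q
        rw [Nat.testBit_mod_two_pow, Nat.testBit_two_pow_sub_one]
        rcases Nat.lt_trichotomy q c with h | h | h
        · simp [h, hlow q h, show q < c + 1 by omega]
        · subst h; simp [hbc]
        · simp [show ¬ q < c + 1 by omega, show ¬ q < c by omega]
      obtain ⟨u, hu⟩ : ∃ u, n = 2 ^ (c + 1) * u + (2 ^ c - 1) :=
        ⟨n / 2 ^ (c + 1), by have := Nat.div_add_mod n (2 ^ (c + 1)); omega⟩
      have hp0 : 0 < 2 ^ c := Nat.two_pow_pos c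
      have handn : (n + 1) &&& n = 2 ^ (c + 1) * u := by
        calc (n + 1) &&& n = (2 ^ (c+1) * u + 2 ^ c) &&& (2 ^ (c+1) * u + (2 ^ c - 1)) := by
              rw [← hu, show 2 ^ (c+1) * u + 2 ^ c = n + 1 by omega]
          _ = 2 ^ (c+1) * u := and_succ_pred u c
      have hlowv : n + 1 - ((n + 1) &&& n) = 2 ^ c := by omega
      rw [fillLoop]
      simp only [band_not_succ, hlowv, natCast_shiftRight30]
      rw [show ((2:Nat) ^ c >>> 30) = 0 by
            rw [Nat.shiftRight_eq_div_pow]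
            exact Nat.div_eq_of_lt (Nat.pow_lt_pow_right (by norm_num) (by omega))]
      rw [if_neg (by norm_num), PySem.Int.bor_natCast]
      have hstep : n ||| 2 ^ c = List.foldl orN m (F.take (i + 1)) := by
        rw [List.take_add_one, List.getElem?_eq_getElem hilt]
        simp only [Option.toList_some, List.foldl_append, List.foldl_cons, List.foldl_nil]
        rfl
      rw [hstep, show i + (j + 1) = i + 1 + j by omega]
      exact ih (i + 1) (by omega)
    · -- all 30 positions already set: the loop breaks
      have hfull : n = 2 ^ 30 - 1 := by
        apply Nat.eq_of_testBit_eq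
        intro q
        rw [htb, Nat.testBit_two_pow_sub_one, List.take_of_length_le (by omega)]
        by_cases hq : q < 30
        · rcases Bool.eq_false_or_eq_true (m.testBit q) with hb | hb
          · simp [hb, hq]
          · simp [hb, hq, (hmemF q).mpr ⟨by omega, hb⟩]
        · have hb : m.testBit q = false :=
            Nat.testBit_lt_two_pow (lt_of_lt_of_le hm (Nat.pow_le_pow_right (by norm_num) (by omega)))
          have hnq : q ∉ F := fun h => absurd ((hmemF q).mp h).1 (by omega)
          simp [hb, hq, hnq]
      have handn : (n + 1) &&& n = 0 := by
        rw [hfull, show 2 ^ 30 - 1 + 1 = 2 ^ 30 by norm_num, Nat.and_comm, Nat.and_two_pow,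
            Nat.testBit_two_pow_sub_one]
        simp
      rw [fillLoop]
      simp only [band_not_succ, handn, Nat.sub_zero, natCast_shiftRight30]
      rw [if_pos (by
            rw [hfull, show (2:Nat) ^ 30 - 1 + 1 = 2 ^ 30 by norm_num,
                show ((2:Nat) ^ 30) >>> 30 = 1 by norm_num [Nat.shiftRight_eq_div_pow]]
            norm_num)]
      rw [show min (i + (j + 1)) F.length = i by omega]

-- A reduced to the canonical selection over its own position predicates
theorem A_canon (a b : Int) :
    minVal a b = ↑(List.foldl orN 0
      ((((descList 29).filter (bitP a)) ++ ((ascFrom 0 30).filter (fun k => !(bitP a k)))).take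
        (PySem.Int.bitCount b))) := by
  set C : Nat := PySem.Int.bitCount b with hC
  set D : List Nat := (descList 29).filter (bitP a) with hD
  set F : List Nat := (ascFrom 0 30).filter (fun k => !(bitP a k)) with hF
  have hA : minVal a b =
      specUp ((C : Int) - ↑(min C D.length)) (↑(List.foldl orN 0 (D.take C))) (ascFrom 0 30) := by
    show minValLoop2 31 (minValLoop1 a 31 (C:Int) 0 ((1:Int) <<< 29)).1
        (minValLoop1 a 31 (C:Int) 0 ((1:Int) <<< 29)).2 1 = _
    rw [show ((1:Int) <<< 29) = ((2^29 : Nat) : Int) by decide,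
        show (0:Int) = ((0:Nat) : Int) from rfl,
        loop1_eq a 29 _ _ 31 (by omega), specDown_eq]
    rw [show ((1:Int)) = ((2^(30-30) : Nat) : Int) by norm_num,
        loop2_eq 30 (by omega) _ _ 31 (by omega)]
    simp only [Int.toNat_natCast]
    rw [← hD]
  rw [hA, specUp_eq _ _ _ (by decide)]
  congr 1
  have hto : ((C : Int) - ↑(min C D.length)).toNat = C - D.length := by omega
  rw [hto, List.take_append, List.foldl_append]
  by_cases hlen : C ≤ D.length
  · have : C - D.length = 0 := by omega
    rw [this]
    rfl
  · have hDfull : D.take C = D := List.take_of_length_le (by omega)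
    rw [hDfull]
    have hfe : (ascFrom 0 30).filter (fun k => !(List.foldl orN 0 D).testBit k) = F := by
      rw [hF]
      apply List.filter_congr
      intro k hk
      have hk29 : k ∈ descList 29 := by
        have h2 : k ∈ (descList 29).reverse := by
          rw [show (descList 29).reverse = ascFrom 0 30 by decide]; exact hk
        simpa using h2
      rw [testBit_foldl_orN]
      simp only [Nat.zero_testBit, Bool.false_or]
      by_cases hb : bitP a k
      · simp [hD, List.mem_filter, hk29, hb]
      · simp [hD, List.mem_filter, hb]
    rw [hfe]

theorem B_canon (a b : Int) :
    minVal_alt a b = ↑(List.foldl orN 0 ((Dm (Mof a) ++ Fm (Mof a)).take (PySem.Int.bitCount b))) := by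
  have hmask : ((1:Int) <<< 30) - 1 = ((2 ^ 30 - 1 : Nat) : Int) := by decide
  have h0 : 0 ≤ PySem.Int.band a (((2 ^ 30 - 1 : Nat)) : Int) := by
    rw [PySem.Int.band_comm]
    exact PySem.Int.band_nonneg_of_nonneg_left a (by positivity)
  have hba : PySem.Int.band a (((1:Int) <<< 30) - 1) = ((Mof a : Nat) : Int) := by
    rw [hmask, Mof, Int.toNat_of_nonneg h0]
  set M := Mof a with hM
  set C : Nat := PySem.Int.bitCount b with hC
  have hMlt := Mof_lt a
  have hpc : PySem.Int.bitCount ((M : Nat) : Int) = (Dm M).length :=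
    (bitCount_eq_countP 30 M hMlt).trans (length_Dm M).symm
  unfold minVal_alt
  simp only [hba, hpc, ← hC]
  by_cases hcase : (C : Int) ≤ ((Dm M).length : Int)
  · rw [if_pos (by omega)]
    have htn : (((Dm M).length : Int) - (C : Int)).toNat = (Dm M).length - C := by omega
    rw [htn]
    rw [show ((M : Nat) : Int) = ((List.foldl orN 0 (Dm M) : Nat) : Int) by
          rw [foldl_orN_Dm M hMlt]]
    rw [strip_eq _ _ (pairwise_gt_Dm M) (by omega)]
    rw [show (Dm M).length - ((Dm M).length - C) = C by omega]
    rw [List.take_append_of_le_length (by omega)]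
  · rw [if_neg (by omega)]
    have htn : (-(((Dm M).length : Int) - (C : Int))).toNat = C - (Dm M).length := by omega
    rw [htn]
    have h00 : ((M : Nat) : Int) = ((List.foldl orN M ((Fm M).take 0) : Nat) : Int) := by norm_num
    rw [h00, fill_eq M hMlt (C - (Dm M).length) 0 (by omega)]
    have htk : ∀ (l : List Nat) (x : Nat), l.take (min x l.length) = l.take x := by
      intro l x
      rcases Nat.lt_or_ge l.length x with h | h
      · rw [min_eq_right (by omega), List.take_length, List.take_of_length_le (by omega)]
      · rw [min_eq_left (by omega)]
    rw [Nat.zero_add, htk]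
    rw [List.take_append, List.take_of_length_le (show (Dm M).length ≤ C by omega),
        List.foldl_append, foldl_orN_Dm M hMlt]

-- ===== VERDICT (by name: the statement is the Claim_ definition above) =====
theorem minVal_spec : Claim_equal_minVal := by
  unfold Claim_equal_minVal Spec_minVal
  intro a b _
  rw [A_canon, B_canon]
  have e1 : (descList 29).filter (bitP a) = Dm (Mof a) := by
    apply List.filter_congr
    intro k hk
    exact bitP_eq_testBit_Mof a k ((mem_descList29 k).mp hk)
  have e2 : (ascFrom 0 30).filter (fun k => !(bitP a k)) = Fm (Mof a) := by
    apply List.filter_congr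
    intro k hk
    rw [bitP_eq_testBit_Mof a k ((mem_ascFrom30 k).mp hk)]
  rw [e1, e2]
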